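-- pv_equiv track=rewrite | github.com/daniel1mor3055/journey-buddi | backend/app/services/itinerary_generator.py | _order_areas
-- ===== SOURCE A (Python) =====
-- SOUTH_ISLAND_ROUTE = [
--     "Christchurch", "Akaroa", "Kaikoura", "Hanmer Springs",
--     "Nelson", "Abel Tasman", "West Coast", "Punakaiki",
--     "Hokitika", "Franz Josef", "Wanaka", "Queenstown",
--     "Milford Sound", "Te Anau", "Dunedin", "Lake Tekapo",
--     "Aoraki/Mt Cook",
-- ]
--
-- NORTH_ISLAND_ROUTE = [
--     "Auckland", "Waiheke Island", "Coromandel", "Hahei", "Whitianga",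
--     "Matamata", "Rotorua", "Taupo", "Tongariro", "Taranaki",
--     "Waitomo", "Putaruru", "Bay of Plenty",
-- ]
--
-- def _order_areas(areas: set[str], route_direction: str = "clockwise") -> list[str]:
--     combined_route = NORTH_ISLAND_ROUTE + SOUTH_ISLAND_ROUTE
--     if route_direction == "counter-clockwise":
--         combined_route = list(reversed(combined_route))
--
--     ordered = [area for area in combined_route if area in areas]
--     for area in sorted(areas):
--         if area not in ordered:
--             ordered.append(area)
--     return ordered
-- ===== SOURCE B (Python) =====
-- SOUTH_ISLAND_ROUTE = [
--     "Christchurch", "Akaroa", "Kaikoura", "Hanmer Springs",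
--     "Nelson", "Abel Tasman", "West Coast", "Punakaiki",
--     "Hokitika", "Franz Josef", "Wanaka", "Queenstown",
--     "Milford Sound", "Te Anau", "Dunedin", "Lake Tekapo",
--     "Aoraki/Mt Cook",
-- ]
--
-- NORTH_ISLAND_ROUTE = [
--     "Auckland", "Waiheke Island", "Coromandel", "Hahei", "Whitianga",
--     "Matamata", "Rotorua", "Taupo", "Tongariro", "Taranaki",
--     "Waitomo", "Putaruru", "Bay of Plenty",
-- ]
--
-- def _order_areas(areas: set[str], route_direction: str = "clockwise") -> list[str]:
--     combined_route = NORTH_ISLAND_ROUTE + SOUTH_ISLAND_ROUTE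
--     if route_direction == "counter-clockwise":
--         combined_route = list(reversed(combined_route))
--
--     index = {area: i for i, area in enumerate(combined_route)}
--     on_route = [area for area in areas if area in index]
--     off_route = [area for area in areas if area not in index]
--     return sorted(on_route, key=index.__getitem__) + sorted(off_route)
-- ===== Notes on version B (the rewrite author's own statement) =====
-- stated objective: idiomatic
-- what changed: B builds a route-position dict once and partitions `areas` into on-route/off-route, returning sorted(on_route, key=position) + sorted(off_route), instead of A's scan of the route plus the quadratic `area not in ordered` list probe.
import Mathlib
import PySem

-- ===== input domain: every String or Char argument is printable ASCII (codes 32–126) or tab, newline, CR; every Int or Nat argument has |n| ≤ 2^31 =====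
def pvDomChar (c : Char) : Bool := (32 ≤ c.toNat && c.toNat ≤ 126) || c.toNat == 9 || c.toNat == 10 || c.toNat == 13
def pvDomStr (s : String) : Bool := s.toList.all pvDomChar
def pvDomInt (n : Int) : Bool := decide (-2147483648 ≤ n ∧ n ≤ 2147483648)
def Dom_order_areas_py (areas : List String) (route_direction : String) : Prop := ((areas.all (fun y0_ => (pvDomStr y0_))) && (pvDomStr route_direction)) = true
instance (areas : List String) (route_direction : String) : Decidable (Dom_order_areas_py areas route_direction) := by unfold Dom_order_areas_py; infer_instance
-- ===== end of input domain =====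

-- B replaces A's scan of the route with membership tests by a position-index dict: it partitions
-- `areas` into on-route/off-route and sorts the on-route part by route position (objective: idiomatic).

def southRoute : List String :=
  ["Christchurch", "Akaroa", "Kaikoura", "Hanmer Springs",
   "Nelson", "Abel Tasman", "West Coast", "Punakaiki",
   "Hokitika", "Franz Josef", "Wanaka", "Queenstown",
   "Milford Sound", "Te Anau", "Dunedin", "Lake Tekapo",
   "Aoraki/Mt Cook"]

def northRoute : List String :=
  ["Auckland", "Waiheke Island", "Coromandel", "Hahei", "Whitianga",
   "Matamata", "Rotorua", "Taupo", "Tongariro", "Taranaki",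
   "Waitomo", "Putaruru", "Bay of Plenty"]

-- ===== PORT A =====
def order_areas_py (areas : List String) (route_direction : String) : List String :=
  let combined0 := northRoute ++ southRoute
  let combined := if route_direction == "counter-clockwise" then combined0.reverse else combined0
  let ordered := combined.filter (fun area => areas.contains area)
  (PySem.List.sorted areas (fun x => x) false).foldl
    (fun acc area => if acc.contains area then acc else acc ++ [area]) ordered

-- ===== PORT B =====
-- {area: i for i, area in enumerate(combined_route)}
def routeIndex (combined : List String) : PySem.Dict String Int :=
  (PySem.List.enumerate combined 0).foldl (fun d p => d.insert p.2 p.1) PySem.Dict.empty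

def order_areas_py_alt (areas : List String) (route_direction : String) : List String :=
  let combined0 := northRoute ++ southRoute
  let combined := if route_direction == "counter-clockwise" then combined0.reverse else combined0
  let index := routeIndex combined
  let onRoute := areas.filter (fun a => index.contains a)
  let offRoute := areas.filter (fun a => !(index.contains a))
  PySem.List.sorted onRoute (fun a => index.getD a 0) false
    ++ PySem.List.sorted offRoute (fun x => x) false

-- ===== PRECONDITION & SPEC =====
-- `areas` is a Python set: its List-model holds DISTINCT elements, so Pre_ excludes no input
-- the Python function is ever called on.
def Pre_order_areas_py (areas : List String) (route_direction : String) : Prop := areas.Nodup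
instance (areas : List String) (route_direction : String) : Decidable (Pre_order_areas_py areas route_direction) := by unfold Pre_order_areas_py; infer_instance
def pvWitness_order_areas_py : List String × String := (["Rotorua", "Zoo", "Auckland"], "clockwise")

def Spec_order_areas_py (areas : List String) (route_direction : String) (out : List String) : Prop := out = order_areas_py_alt areas route_direction
instance (areas : List String) (route_direction : String) (out : List String) : Decidable (Spec_order_areas_py areas route_direction out) := by unfold Spec_order_areas_py; infer_instance

-- ===== CLAIM (what is proved, stated in full; the proofs are below) =====
def Claim_equal_order_areas_py : Prop := ∀ (areas : List String) (route_direction : String), Dom_order_areas_py areas route_direction → Pre_order_areas_py areas route_direction → Spec_order_areas_py areas route_direction (order_areas_py areas route_direction)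

-- ===== LEMMAS AND PROOFS =====

lemma combined_nodup (rd : String) :
    (if rd == "counter-clockwise" then (northRoute ++ southRoute).reverse
     else northRoute ++ southRoute).Nodup := by
  have h : (northRoute ++ southRoute).Nodup := by decide
  split
  · exact List.nodup_reverse.mpr h
  · exact h

lemma items_routeIndex (rt : List String) (h : rt.Nodup) :
    (routeIndex rt).items = (PySem.List.enumerate rt 0).map (fun p => (p.2, p.1)) := by
  unfold routeIndex
  have := PySem.Dict.items_foldl_insert_fresh (PySem.List.enumerate rt 0)
      (fun p => p.2) (fun p => p.1) PySem.Dict.empty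
      (fun a _ => PySem.Dict.contains_empty _)
      (by rw [PySem.List.map_snd_enumerate]; exact h)
  simpa using this

lemma keys_routeIndex (rt : List String) (h : rt.Nodup) : (routeIndex rt).keys = rt := by
  simp only [PySem.Dict.keys, items_routeIndex rt h, List.map_map]
  have hcomp : ((fun x => x.1) ∘ fun p : Int × String => (p.2, p.1)) = (fun p => p.2) := rfl
  rw [hcomp]
  exact PySem.List.map_snd_enumerate rt 0

lemma contains_routeIndex (rt : List String) (h : rt.Nodup) (a : String) :
    (routeIndex rt).contains a = rt.contains a := by
  rw [PySem.Dict.contains_eq_decide_mem_keys, keys_routeIndex rt h, List.contains_eq_mem]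

lemma getD_routeIndex (rt : List String) (h : rt.Nodup) (i : Nat) (hi : i < rt.length) :
    (routeIndex rt).getD rt[i] 0 = (i : Int) := by
  have hm : (rt[i], (i : Int)) ∈ (routeIndex rt).items := by
    rw [items_routeIndex rt h]
    refine List.mem_map.mpr ⟨((i : Int), rt[i]), ?_, rfl⟩
    rw [PySem.List.mem_enumerate_iff]
    exact ⟨i, hi, by simp⟩
  exact PySem.Dict.getD_of_mem_items _ hm (by rw [keys_routeIndex rt h]; exact h) 0

lemma pairwise_routeIndex (rt : List String) (h : rt.Nodup) :
    rt.Pairwise (fun a b => (routeIndex rt).getD a 0 < (routeIndex rt).getD b 0) := by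
  rw [List.pairwise_iff_getElem]
  intro i j hi hj hij
  rw [getD_routeIndex rt h i hi, getD_routeIndex rt h j hj]
  exact_mod_cast hij

lemma foldl_dedup_append (ys : List String) (init : List String) (h : ys.Nodup) :
    ys.foldl (fun acc a => if acc.contains a then acc else acc ++ [a]) init
      = init ++ ys.filter (fun a => !init.contains a) := by
  induction ys generalizing init with
  | nil => simp
  | cons a t ih =>
    rcases List.nodup_cons.mp h with ⟨hat, ht⟩
    simp only [List.foldl_cons]
    by_cases hmem : a ∈ init
    · rw [if_pos (by simp [List.contains_eq_mem, hmem]), ih init ht]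
      simp [hmem]
    · rw [if_neg (by simp [List.contains_eq_mem, hmem]), ih (init ++ [a]) ht]
      have hfilter : t.filter (fun x => !((init ++ [a]).contains x))
          = t.filter (fun x => !init.contains x) := by
        apply List.filter_congr
        intro x hx
        have hxa : x ≠ a := fun e => hat (e ▸ hx)
        simp [List.contains_eq_mem, hxa]
      rw [hfilter]
      simp [hmem]

lemma onRoute_sorted (rt areas : List String) (hrt : rt.Nodup) (ha : areas.Nodup) :
    PySem.List.sorted (areas.filter (fun a => (routeIndex rt).contains a))
        (fun a => (routeIndex rt).getD a 0) false
      = rt.filter (fun a => areas.contains a) := by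
  apply PySem.List.sorted_eq_of_perm_of_pairwise_lt
  · rw [List.perm_ext_iff_of_nodup (hrt.filter _) (ha.filter _)]
    intro a
    simp only [List.mem_filter, contains_routeIndex rt hrt, List.contains_eq_mem,
      decide_eq_true_eq]
    tauto
  · exact (pairwise_routeIndex rt hrt).filter _

lemma offRoute_sorted (rt areas : List String) (hrt : rt.Nodup) :
    PySem.List.sorted (areas.filter (fun a => !((routeIndex rt).contains a))) (fun x => x) false
      = (PySem.List.sorted areas (fun x => x) false).filter (fun a => !rt.contains a) := by
  apply PySem.List.sorted_id_eq_of_perm_of_pairwise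
  · have hp := (PySem.List.sorted_perm areas (fun x => x) false).filter
      (fun a => !rt.contains a)
    refine hp.trans ?_
    have he : areas.filter (fun a => !rt.contains a)
        = areas.filter (fun a => !((routeIndex rt).contains a)) := by
      apply List.filter_congr
      intro x _
      rw [contains_routeIndex rt hrt]
    rw [he]
  · exact (PySem.List.sorted_pairwise areas (fun x => x)).filter _

-- ===== VERDICT (by name: the statement is the Claim_ definition above) =====
theorem order_areas_py_spec : Claim_equal_order_areas_py := by
  intro areas rd _ ha
  unfold Spec_order_areas_py order_areas_py order_areas_py_alt
  simp only
  set rt := if rd == "counter-clockwise" then (northRoute ++ southRoute).reverse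
            else northRoute ++ southRoute with hrtdef
  have hrt : rt.Nodup := combined_nodup rd
  have hsnd : (PySem.List.sorted areas (fun x => x) false).Nodup :=
    ((PySem.List.sorted_perm areas (fun x => x) false).nodup_iff).mpr ha
  rw [foldl_dedup_append _ _ hsnd, onRoute_sorted rt areas hrt ha,
    offRoute_sorted rt areas hrt]
  congr 1
  apply List.filter_congr
  intro x hx
  have hxa : x ∈ areas := (PySem.List.sorted_perm areas (fun x => x) false).mem_iff.mp hx
  simp [List.contains_eq_mem, List.mem_filter, hxa]
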